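-- pv_equiv track=rewrite | github.com/Aruk2004/GFG_POTD | June_2024/June_07.py | maxOccured
-- ===== SOURCE A (Python) =====
-- def maxOccured(n, l, r, maxx):
--     diff = [0] * (maxx + 2)
--     for i in range(n):
--         diff[l[i]] += 1
--         diff[r[i] + 1] -= 1
--     max_freq = 0
--     result = 0
--     curr_freq = 0
--     for i in range(maxx + 1):
--         curr_freq += diff[i]
--         if curr_freq > max_freq:
--             max_freq = curr_freq
--             result = i
--
--     return result
-- ===== SOURCE B (Python) =====
-- def maxOccured(n, l, r, maxx):
--     best = 0
--     result = 0
--     for x in range(maxx + 1):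
--         c = 0
--         for i in range(n):
--             if l[i] <= x:
--                 c += 1
--             if r[i] < x:
--                 c -= 1
--         if c > best:
--             best = c
--             result = x
--     return result
-- ===== Notes on version B (the rewrite author's own statement) =====
-- stated objective: alternative
-- what changed: B drops the difference array and its prefix-sum accumulation: for each point x it recounts from scratch the intervals already started (l[i] <= x) minus those already ended (r[i] < x), keeping the best count and the first coordinate that attains it.
-- outside the precondition, e.g. on maxOccured(1, [-3], [5], 5): A returns 4, B returns 0; on maxOccured(1, [1], [-2], 3): A returns 1, B returns 0
import Mathlib
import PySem

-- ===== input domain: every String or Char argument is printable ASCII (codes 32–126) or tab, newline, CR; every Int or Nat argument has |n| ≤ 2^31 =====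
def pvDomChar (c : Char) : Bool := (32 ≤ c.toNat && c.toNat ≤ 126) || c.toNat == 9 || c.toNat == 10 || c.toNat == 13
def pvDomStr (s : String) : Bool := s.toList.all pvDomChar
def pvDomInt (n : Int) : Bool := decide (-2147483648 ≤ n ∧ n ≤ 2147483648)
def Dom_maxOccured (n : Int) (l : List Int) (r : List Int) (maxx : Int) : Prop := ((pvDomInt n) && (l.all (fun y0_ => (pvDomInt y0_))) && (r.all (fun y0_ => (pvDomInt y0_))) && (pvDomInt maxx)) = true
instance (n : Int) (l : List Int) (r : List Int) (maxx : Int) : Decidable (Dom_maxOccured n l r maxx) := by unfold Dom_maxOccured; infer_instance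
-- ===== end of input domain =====

-- B replaces A's difference array + prefix-sum sweep by a direct recount, for each
-- point x in [0, maxx], of intervals started minus intervals ended (alternative
-- decomposition, not faster).

-- ===== PORT A =====
-- pyGetD/pySetD are the total forms of l[i] / diff[p] = v; Pre_maxOccured puts every
-- index inside Raise.InRange, where they are exact.
def maxOccured (n : Int) (l : List Int) (r : List Int) (maxx : Int) : Int :=
  let diff0 : List Int := List.replicate (maxx + 2).toNat 0
  let diff := (PySem.List.pyRange 0 n 1).foldl (fun d i =>
      let p := PySem.List.pyGetD l i 0
      let d1 := PySem.List.pySetD d p (PySem.List.pyGetD d p 0 + 1)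
      let q := PySem.List.pyGetD r i 0 + 1
      PySem.List.pySetD d1 q (PySem.List.pyGetD d1 q 0 - 1)) diff0
  -- state st = (max_freq, result, curr_freq)
  let st := (PySem.List.pyRange 0 (maxx + 1) 1).foldl (fun (st : Int × Int × Int) i =>
      let curr := st.2.2 + PySem.List.pyGetD diff i 0
      if curr > st.1 then (curr, i, curr) else (st.1, st.2.1, curr)) (0, 0, 0)
  st.2.1

-- ===== PORT B =====
def maxOccured_alt (n : Int) (l : List Int) (r : List Int) (maxx : Int) : Int :=
  -- state st = (best, result)
  let st := (PySem.List.pyRange 0 (maxx + 1) 1).foldl (fun (st : Int × Int) x =>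
      let c := (PySem.List.pyRange 0 n 1).foldl (fun acc i =>
          let acc1 := if PySem.List.pyGetD l i 0 ≤ x then acc + 1 else acc
          if PySem.List.pyGetD r i 0 < x then acc1 - 1 else acc1) 0
      if c > st.1 then (c, x) else st) (0, 0)
  st.2

-- ===== PRECONDITION & SPEC =====
-- Pre_ requires 0 ≤ n ≤ len(l), len(r) and every difference-array index l[i], r[i]+1
-- in [0, maxx+1]: outside it A either raises IndexError or returns a value only via
-- Python's negative-index wraparound, an accident of the array representation.
def Pre_maxOccured (n : Int) (l : List Int) (r : List Int) (maxx : Int) : Prop :=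
  (0 < n → n ≤ (l.length : Int) ∧ n ≤ (r.length : Int)) ∧
  ∀ i ∈ List.range n.toNat,
    0 ≤ l.getD i 0 ∧ l.getD i 0 ≤ maxx + 1 ∧ -1 ≤ r.getD i 0 ∧ r.getD i 0 ≤ maxx
instance (n : Int) (l : List Int) (r : List Int) (maxx : Int) : Decidable (Pre_maxOccured n l r maxx) := by unfold Pre_maxOccured; infer_instance

def pvWitness_maxOccured : Int × List Int × List Int × Int := (2, [1, 0], [2, 3], 4)

def Spec_maxOccured (n : Int) (l : List Int) (r : List Int) (maxx : Int) (out : Int) : Prop := out = maxOccured_alt n l r maxx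
instance (n : Int) (l : List Int) (r : List Int) (maxx : Int) (out : Int) : Decidable (Spec_maxOccured n l r maxx out) := by unfold Spec_maxOccured; infer_instance

-- ===== CLAIM (what is proved, stated in full; the proofs are below) =====
def Claim_equal_maxOccured : Prop := ∀ (n : Int) (l : List Int) (r : List Int) (maxx : Int), Dom_maxOccured n l r maxx → Pre_maxOccured n l r maxx → Spec_maxOccured n l r maxx (maxOccured n l r maxx)

-- ===== LEMMAS AND PROOFS =====

-- among the first m intervals: number started by x minus number ended before x
def pvCnt (l r : List Int) (m : Nat) (x : Int) : Int :=
  (List.range m).foldl (fun acc i =>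
    let acc1 := if l.getD i 0 ≤ x then acc + 1 else acc
    if r.getD i 0 < x then acc1 - 1 else acc1) 0

-- prefix sum of the first k entries of d
def pvPsum (d : List Int) (k : Nat) : Int :=
  ((List.range k).map (fun j => d.getD j 0)).sum

-- the difference array after processing the first m intervals
def pvBuild (l r : List Int) (m : Nat) (d : List Int) : List Int :=
  (List.range m).foldl (fun d i =>
      let p := (l.getD i 0 : Int)
      let d1 := PySem.List.pySetD d p (PySem.List.pyGetD d p 0 + 1)
      let q := (r.getD i 0 : Int) + 1
      PySem.List.pySetD d1 q (PySem.List.pyGetD d1 q 0 - 1)) d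

theorem pvPsum_succ (d : List Int) (k : Nat) :
    pvPsum d (k + 1) = pvPsum d k + d.getD k 0 := by
  simp [pvPsum, List.range_succ]

theorem pvPsum_set (d : List Int) (j : Nat) (v : Int) (k : Nat) :
    pvPsum (d.set j v) k = pvPsum d k + (if j < k ∧ j < d.length then v - d.getD j 0 else 0) := by
  induction k with
  | zero => simp [pvPsum]
  | succ k ih =>
      rw [pvPsum_succ, pvPsum_succ, ih]
      rcases Nat.lt_or_ge j d.length with hj | hj
      · by_cases hjk : j = k
        · subst hjk
          simp [List.getD, hj]
        · have : (d.set j v).getD k 0 = d.getD k 0 := by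
            simp [List.getD, List.getElem?_set_ne hjk]
          rw [this]; split_ifs <;> omega
      · have hset : d.set j v = d := List.set_eq_of_length_le (by omega)
        rw [hset]; split_ifs <;> omega

theorem pvPsum_replicate (k j : Nat) : pvPsum (List.replicate k (0 : Int)) j = 0 := by
  induction j with
  | zero => simp [pvPsum]
  | succ j ih =>
      rw [pvPsum_succ, ih]
      simp only [List.getD, List.getElem?_replicate]
      split <;> rfl

theorem pvBuild_succ (l r : List Int) (m : Nat) (d : List Int) :
    pvBuild l r (m + 1) d =
      (let p := (l.getD m 0 : Int)
       let d1 := PySem.List.pySetD (pvBuild l r m d) p (PySem.List.pyGetD (pvBuild l r m d) p 0 + 1)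
       let q := (r.getD m 0 : Int) + 1
       PySem.List.pySetD d1 q (PySem.List.pyGetD d1 q 0 - 1)) := by
  simp [pvBuild, List.range_succ]

theorem pvBuild_length (l r : List Int) (m : Nat) (d : List Int) :
    (pvBuild l r m d).length = d.length := by
  induction m with
  | zero => rfl
  | succ m ih => rw [pvBuild_succ]; simp [PySem.List.length_pySetD, ih]

theorem pvCnt_succ (l r : List Int) (m : Nat) (x : Int) :
    pvCnt l r (m + 1) x =
      pvCnt l r m x + (if l.getD m 0 ≤ x then 1 else 0) +
        (if r.getD m 0 < x then -1 else 0) := by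
  simp only [pvCnt, List.range_succ, List.foldl_append, List.foldl_cons, List.foldl_nil]
  split_ifs <;> omega

-- the prefix sums of the difference array count the covering intervals
theorem pvPsum_build (l r : List Int) (maxx x : Int) (hx : 0 ≤ x) (hx2 : x ≤ maxx)
    (m : Nat) (d : List Int) (hd : d.length = (maxx + 2).toNat)
    (hm : ∀ i ∈ List.range m,
        0 ≤ l.getD i 0 ∧ l.getD i 0 ≤ maxx + 1 ∧ -1 ≤ r.getD i 0 ∧ r.getD i 0 ≤ maxx) :
    pvPsum (pvBuild l r m d) (x.toNat + 1) = pvPsum d (x.toNat + 1) + pvCnt l r m x := by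
  induction m with
  | zero => simp [pvBuild, pvCnt]
  | succ m ih =>
      have hmem : (m : Nat) ∈ List.range (m + 1) := by simp
      obtain ⟨h0, h1, h2, h3⟩ := hm m hmem
      have hm' : ∀ i ∈ List.range m,
          0 ≤ l.getD i 0 ∧ l.getD i 0 ≤ maxx + 1 ∧ -1 ≤ r.getD i 0 ∧ r.getD i 0 ≤ maxx := by
        intro i hi; exact hm i (by simp at hi ⊢; omega)
      have hlen : (pvBuild l r m d).length = (maxx + 2).toNat := by
        rw [pvBuild_length]; exact hd
      set D := pvBuild l r m d with hD
      have hp : (l.getD m 0).toNat < D.length := by rw [hlen]; omega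
      have hq : (r.getD m 0 + 1).toNat < D.length := by rw [hlen]; omega
      rw [pvBuild_succ]
      simp only [← hD]
      rw [PySem.List.pySetD_of_nonneg (i := l.getD m 0) _ _ (by omega),
          PySem.List.pySetD_of_nonneg (i := r.getD m 0 + 1) _ _ (by omega)]
      rw [pvPsum_set, pvPsum_set]
      rw [ih hm']
      have e1 : PySem.List.pyGetD D (l.getD m 0) 0 = D.getD (l.getD m 0).toNat 0 := by
        rw [PySem.List.pyGetD_eq_getElem D 0 (by omega) (by omega : l.getD m 0 < (D.length : Int))]
        exact (List.getD_eq_getElem ..).symm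
      set D1 := D.set (l.getD m 0).toNat (PySem.List.pyGetD D (l.getD m 0) 0 + 1) with hD1
      have hq1 : (r.getD m 0 + 1).toNat < D1.length := by rw [hD1, List.length_set]; exact hq
      have e2 : PySem.List.pyGetD D1 (r.getD m 0 + 1) 0 = D1.getD (r.getD m 0 + 1).toNat 0 := by
        rw [PySem.List.pyGetD_eq_getElem D1 0 (by omega) (by rw [hD1, List.length_set]; omega : r.getD m 0 + 1 < (D1.length : Int))]
        exact (List.getD_eq_getElem ..).symm
      rw [pvCnt_succ, e1, e2]
      have c1 : ((l.getD m 0).toNat < x.toNat + 1 ∧ (l.getD m 0).toNat < D.length) ↔ l.getD m 0 ≤ x := by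
        constructor
        · intro h; omega
        · intro h; constructor <;> omega
      have c2 : ((r.getD m 0 + 1).toNat < x.toNat + 1 ∧ (r.getD m 0 + 1).toNat < D1.length) ↔ r.getD m 0 + 1 ≤ x := by
        constructor
        · intro h; omega
        · intro h; refine ⟨by omega, ?_⟩; rw [hD1, List.length_set]; omega
      simp only [c1, c2]
      split_ifs <;> omega

-- lockstep: A's prefix-sum sweep and B's count sweep keep equal (best, result) states
theorem pvSweep (diff : List Int) (c : Nat → Int) (M : Nat)
    (hc : ∀ x : Nat, x < M → pvPsum diff (x + 1) = c x) :
    ∀ m : Nat, m ≤ M →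
      (List.range m).foldl (fun (st : Int × Int × Int) (x : Nat) =>
          let curr := st.2.2 + diff.getD x 0
          if curr > st.1 then (curr, (x : Int), curr) else (st.1, st.2.1, curr)) (0, 0, 0)
        = (((List.range m).foldl (fun (st : Int × Int) (x : Nat) =>
              let c' := c x
              if c' > st.1 then (c', (x : Int)) else st) (0, 0)).1,
           ((List.range m).foldl (fun (st : Int × Int) (x : Nat) =>
              let c' := c x
              if c' > st.1 then (c', (x : Int)) else st) (0, 0)).2,
           pvPsum diff m) := by
  intro m
  induction m with
  | zero => intro _; simp [pvPsum]
  | succ m ih =>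
      intro hm
      rw [List.range_succ, List.foldl_append, List.foldl_append, ih (by omega)]
      simp only [List.foldl_cons, List.foldl_nil]
      have hcm : pvPsum diff m + diff.getD m 0 = c m := by
        rw [← pvPsum_succ]; exact hc m (by omega)
      simp only [hcm]
      split_ifs <;> simp only [Prod.mk.injEq, true_and] <;> rw [pvPsum_succ, hcm]

theorem maxOccured_eq (n : Int) (l : List Int) (r : List Int) (maxx : Int) :
    maxOccured n l r maxx =
      ((List.range (maxx + 1).toNat).foldl (fun (st : Int × Int × Int) (x : Nat) =>
          let curr := st.2.2 +
            (pvBuild l r n.toNat (List.replicate (maxx + 2).toNat 0)).getD x 0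
          if curr > st.1 then (curr, (x : Int), curr) else (st.1, st.2.1, curr))
        (0, 0, 0)).2.1 := by
  unfold maxOccured pvBuild
  simp only [PySem.List.pyRange_one, Int.sub_zero, List.foldl_map, zero_add,
    PySem.List.pyGetD_natCast]

theorem maxOccured_alt_eq (n : Int) (l : List Int) (r : List Int) (maxx : Int) :
    maxOccured_alt n l r maxx =
      ((List.range (maxx + 1).toNat).foldl (fun (st : Int × Int) (x : Nat) =>
          let c := pvCnt l r n.toNat (x : Int)
          if c > st.1 then (c, (x : Int)) else st) (0, 0)).2 := by
  unfold maxOccured_alt pvCnt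
  simp only [PySem.List.pyRange_one, Int.sub_zero, List.foldl_map, zero_add,
    PySem.List.pyGetD_natCast]

-- ===== VERDICT (by name: the statement is the Claim_ definition above) =====
theorem maxOccured_spec : Claim_equal_maxOccured := by
  intro n l r maxx _ hpre
  obtain ⟨_, hall⟩ := hpre
  unfold Spec_maxOccured
  have hc : ∀ x : Nat, x < (maxx + 1).toNat →
      pvPsum (pvBuild l r n.toNat (List.replicate (maxx + 2).toNat 0)) (x + 1)
        = pvCnt l r n.toNat (x : Int) := by
    intro x hx
    have h := pvPsum_build l r maxx (x : Int) (by positivity) (by omega) n.toNat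
      (List.replicate (maxx + 2).toNat 0) (by simp) hall
    simpa [pvPsum_replicate] using h
  rw [maxOccured_eq, maxOccured_alt_eq,
    pvSweep (pvBuild l r n.toNat (List.replicate (maxx + 2).toNat 0))
      (fun x => pvCnt l r n.toNat (x : Int)) ((maxx + 1).toNat) hc
      ((maxx + 1).toNat) le_rfl]
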